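-- pv_equiv track=rewrite | github.com/Arcturus187/Python_Project | JetBrains Academy Project/Calculator/Testing.py | calculate
-- ===== SOURCE A (Python) =====
-- def calc_sign(sign_str):
--     if '+' in sign_str:
--         if '-' in sign_str:
--             if sign_str.count('-') % 2 == 0:
--                 return '+'
--             if sign_str.count('-') % 2 == 1:
--                 return '-'
--         else:
--             return '+'
--     elif '-' in sign_str:
--         if sign_str.count('-') % 2 == 0:
--             return '+'
--         if sign_str.count('-') % 2 == 1:
--             return '-'
--     else:
--         raise Exception
--
-- def calculate(text):
--     text = text.replace(' ', '')
--     tmp_list = list(text)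
--     n = len(tmp_list)
--     for i in range(n):
--         if i == (n - 1):
--             continue
--         elif tmp_list[i].isnumeric():
--             if tmp_list[i+1].isnumeric():
--                 continue
--             else:
--                 tmp_list[i] = f'{tmp_list[i]} '
--         else:
--             if tmp_list[i + 1].isnumeric():
--                 tmp_list[i] = f'{tmp_list[i]} '
--     text = ''.join(tmp_list)
--     tmp_list = text.split()
--
--     for i in range(len(tmp_list)):
--         if '+' in tmp_list[i] or '-' in tmp_list[i]:
--             tmp_list[i] = calc_sign(tmp_list[i])
--     math_str = ' '.join(tmp_list)
--     return math_str
-- ===== SOURCE B (Python) =====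
-- def calc_sign(sign_str):
--     if '+' in sign_str:
--         if '-' in sign_str:
--             if sign_str.count('-') % 2 == 0:
--                 return '+'
--             if sign_str.count('-') % 2 == 1:
--                 return '-'
--         else:
--             return '+'
--     elif '-' in sign_str:
--         if sign_str.count('-') % 2 == 0:
--             return '+'
--         if sign_str.count('-') % 2 == 1:
--             return '-'
--     else:
--         raise Exception
--
-- def calculate(text):
--     # One left-to-right pass that groups characters into maximal digit runs and
--     # symbol runs (other whitespace ends a run); a symbol run containing '+' or
--     # '-' collapses to its net sign via calc_sign.  No space insertion, no split.
--     tokens = []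
--     cur = []  # chars of the pending run
--     kind = None  # True = digit run, False = other run
--     def flush():
--         nonlocal cur
--         if cur:
--             tok = ''.join(cur)
--             if kind is False and ('+' in tok or '-' in tok):
--                 tokens.append(calc_sign(tok))
--             else:
--                 tokens.append(tok)
--         cur = []
--     for c in text.replace(' ', ''):
--         if c.isspace():
--             flush()
--             kind = None
--             continue
--         k = c.isnumeric()
--         if k != kind:
--             flush()
--             kind = k
--         cur.append(c)
--     flush()
--     return ' '.join(tokens)
-- ===== Notes on version B (the rewrite author's own statement) =====
-- stated objective: simpler
-- what changed: Replaced A's four-stage pipeline (index loop inserting separator spaces into a char list at digit/non-digit boundaries, join, whitespace split, second index loop rewriting sign tokens in place) by a single left-to-right pass that groups characters into maximal digit runs and symbol runs and collapses a sign run via calc_sign at flush time.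
import Mathlib
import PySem

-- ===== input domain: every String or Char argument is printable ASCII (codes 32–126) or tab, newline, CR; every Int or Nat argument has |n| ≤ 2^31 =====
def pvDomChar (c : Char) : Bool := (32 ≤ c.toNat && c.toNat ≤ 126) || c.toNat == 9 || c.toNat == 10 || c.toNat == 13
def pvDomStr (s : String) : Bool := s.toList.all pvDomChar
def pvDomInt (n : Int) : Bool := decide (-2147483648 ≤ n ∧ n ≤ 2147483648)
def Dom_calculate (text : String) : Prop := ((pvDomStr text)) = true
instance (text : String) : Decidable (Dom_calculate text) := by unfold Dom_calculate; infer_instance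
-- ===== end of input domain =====

-- B replaces A's insert-spaces/join/split/rewrite pipeline by one grouping pass over the
-- de-spaced text (simpler decomposition, same values; calc_sign is reused unchanged).

-- ===== PORT A =====
-- calc_sign; the final 'raise Exception' (and the unreachable fall-through) are `none`.
def calcSignA (s : List Char) : Option (List Char) :=
  if PySem.Chars.isIn ['+'] s then
    if PySem.Chars.isIn ['-'] s then
      if PySem.Chars.count s ['-'] % 2 == 0 then some ['+']
      else if PySem.Chars.count s ['-'] % 2 == 1 then some ['-']
      else none
    else some ['+']
  else if PySem.Chars.isIn ['-'] s then
    if PySem.Chars.count s ['-'] % 2 == 0 then some ['+']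
    else if PySem.Chars.count s ['-'] % 2 == 1 then some ['-']
    else none
  else none

-- first loop body: tmp_list[i] gets a trailing space at a digit/non-digit boundary.
-- `.isnumeric()` is ported as strIsdigit (identical on the printable-ASCII domain);
-- `.getD []` is unreachable: the loop index i (and i+1 when read) is always in range.
def aBody1 (n : Int) (l : List (List Char)) (i : Int) : List (List Char) :=
  if i == n - 1 then l
  else
    let ci := (PySem.List.pyGet? l i).getD []
    let cn := (PySem.List.pyGet? l (i + 1)).getD []
    if PySem.Chars.strIsdigit ci then
      if PySem.Chars.strIsdigit cn then l
      else l.set i.toNat (ci ++ [' '])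
    else
      if PySem.Chars.strIsdigit cn then l.set i.toNat (ci ++ [' '])
      else l

-- second loop body: a token containing '+' or '-' is replaced by calc_sign(token).
-- `.getD t` is unreachable there: calc_sign returns on every guarded token.
def aBody2 (l : List (List Char)) (i : Int) : List (List Char) :=
  let t := (PySem.List.pyGet? l i).getD []
  if PySem.Chars.isIn ['+'] t || PySem.Chars.isIn ['-'] t then
    l.set i.toNat ((calcSignA t).getD t)
  else l

def calculate (text : String) : String :=
  let t := PySem.Chars.replace text.toList [' '] []      -- text.replace(' ', '')
  let tmp := t.map (fun c => [c])                         -- list(text)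
  let n : Int := (tmp.length : Int)
  let tmp2 := (PySem.List.pyRange 0 n 1).foldl (aBody1 n) tmp
  let t2 := PySem.Chars.join [] tmp2                      -- ''.join(tmp_list)
  let tks := PySem.Chars.split₀ t2                        -- text.split()
  let tks2 := (PySem.List.pyRange 0 (tks.length : Int) 1).foldl aBody2 tks
  String.ofList (PySem.Chars.join [' '] tks2)                 -- ' '.join(tmp_list)

-- ===== PORT B =====
-- flush(): emits the pending run; a symbol run (kind = some false) holding '+'/'-'
-- collapses via calc_sign (Source B reuses A's calc_sign; its raise is unreachable here).
def flushB (tokens : List (List Char)) (kind : Option Bool) (cur : List Char) :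
    List (List Char) :=
  if cur.isEmpty then tokens
  else if kind == some false &&
      (PySem.Chars.isIn ['+'] cur || PySem.Chars.isIn ['-'] cur) then
    tokens ++ [(calcSignA cur).getD cur]
  else tokens ++ [cur]

-- loop body: state (tokens, cur, kind); kind = some true digit run, some false other run.
def stepB (st : List (List Char) × List Char × Option Bool) (c : Char) :
    List (List Char) × List Char × Option Bool :=
  let (tokens, cur, kind) := st
  if PySem.Chars.isspace c then (flushB tokens kind cur, [], none)
  else
    let k : Bool := PySem.Chars.isdigit c   -- c.isnumeric(), ASCII
    if (some k : Option Bool) != kind then (flushB tokens kind cur, [c], some k)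
    else (tokens, cur ++ [c], kind)

def calculate_alt (text : String) : String :=
  let r := PySem.Chars.replace text.toList [' '] []       -- text.replace(' ', '')
  let st := r.foldl stepB ([], [], none)
  String.ofList (PySem.Chars.join [' '] (flushB st.1 st.2.2 st.2.1))

-- ===== PRECONDITION & SPEC =====
def Spec_calculate (text : String) (out : String) : Prop := out = calculate_alt text
instance (text : String) (out : String) : Decidable (Spec_calculate text out) := by
  unfold Spec_calculate; infer_instance

-- ===== CLAIM (what is proved, stated in full; the proofs are below) =====
def Claim_equal_calculate : Prop := ∀ (text : String), Dom_calculate text → Spec_calculate text (calculate text)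

-- ===== LEMMAS AND PROOFS =====

-- the rewritten token: what A's second loop does to each token, elementwise
def gTok (t : List Char) : List Char :=
  if PySem.Chars.isIn ['+'] t || PySem.Chars.isIn ['-'] t then (calcSignA t).getD t else t

-- A's list after the first loop, computed structurally
def finA : List Char → List (List Char)
  | [] => []
  | [c] => [[c]]
  | a :: b :: t =>
    (if PySem.Chars.isdigit a != PySem.Chars.isdigit b then [a, ' '] else [a]) :: finA (b :: t)

-- the element finA puts at a position, from the character there and its successor
def finVal (a : Char) : Option Char → List Char
  | none => [a]
  | some b => if PySem.Chars.isdigit a != PySem.Chars.isdigit b then [a, ' '] else [a]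

-- r with a space inserted at every digit/non-digit class boundary (pk = previous class)
def insTail (pk : Option Bool) : List Char → List Char
  | [] => []
  | c :: t =>
    (if pk != none && pk != some (PySem.Chars.isdigit c) then [' '] else []) ++
      c :: insTail (some (PySem.Chars.isdigit c)) t

-- the tokens B still produces from state (cur, kind) on the remaining input rs
def finB (rs : List Char) (cur : List Char) (kind : Option Bool) : List (List Char) :=
  let st := rs.foldl stepB ([], cur, kind)
  flushB st.1 st.2.2 st.2.1

-- B's loop invariant: between runs, or inside a run whose class is kind (= pk)
def INV (cur : List Char) (kind pk : Option Bool) : Prop :=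
  (cur = [] ∧ kind = none ∧ pk ≠ some true) ∨
    (cur ≠ [] ∧ pk = kind ∧ ∃ k, kind = some k ∧
      (k = true → cur.all PySem.Chars.isdigit = true))

theorem isIn_singleton (a : Char) (s : List Char) :
    PySem.Chars.isIn [a] s = true ↔ a ∈ s := by
  rw [PySem.Chars.isIn_iff_infix]; exact List.singleton_infix_iff a s

theorem isspace_not_isdigit (c : Char) (h : PySem.Chars.isspace c = true) :
    PySem.Chars.isdigit c = false := by
  rw [Bool.eq_false_iff]
  intro hd
  simp only [PySem.Chars.isdigit, Bool.and_eq_true, decide_eq_true_eq, Char.le_def,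
    UInt32.le_iff_toNat_le] at hd
  simp only [PySem.Chars.isspace, Char.toNat] at h
  simp only [Bool.or_eq_true, Bool.and_eq_true, decide_eq_true_eq] at h
  have h0 : '0'.val.toNat = 48 := rfl
  have h9 : '9'.val.toNat = 57 := rfl
  rw [h0, h9] at hd
  omega

theorem strIsdigit_singleton (c : Char) :
    PySem.Chars.strIsdigit [c] = PySem.Chars.isdigit c := by
  simp [PySem.Chars.strIsdigit]

theorem length_finA : ∀ r : List Char, (finA r).length = r.length
  | [] => rfl
  | [_] => rfl
  | a :: b :: t => by simp [finA, length_finA (b :: t)]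

theorem finA_getElem? : ∀ (r : List Char) (i : Nat),
    (finA r)[i]? = Option.map (fun a => finVal a r[i + 1]?) r[i]?
  | [], i => by simp [finA]
  | [a], i => by
    cases i with
    | zero => simp [finA, finVal]
    | succ j => simp [finA]
  | a :: b :: t, i => by
    cases i with
    | zero => simp [finA, finVal]
    | succ j =>
      have ih := finA_getElem? (b :: t) j
      simpa [finA] using ih

theorem flatten_intersperse_nil : ∀ (l : List (List Char)), (List.intersperse [] l).flatten = l.flatten
  | [] => rfl
  | [a] => rfl
  | a :: b :: t => by
    rw [show List.intersperse [] (a :: b :: t) = a :: [] :: List.intersperse [] (b :: t) from rfl]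
    simp [flatten_intersperse_nil (b :: t)]

theorem finA_flatten : ∀ (t : List Char) (a : Char),
    (finA (a :: t)).flatten = a :: insTail (some (PySem.Chars.isdigit a)) t
  | [], a => by simp [finA, insTail]
  | b :: t, a => by
    have ih := finA_flatten t b
    simp only [finA, List.flatten_cons, ih, insTail]
    by_cases h : PySem.Chars.isdigit a = PySem.Chars.isdigit b <;> simp [h]

theorem join_finA (r : List Char) : [].intercalate (finA r) = insTail none r := by
  have h : ([] : List Char).intercalate (finA r) = (finA r).flatten := by
    simp [List.intercalate, flatten_intersperse_nil]
  rw [h]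
  cases r with
  | nil => simp [finA, insTail]
  | cons a t => rw [finA_flatten]; simp [insTail]

theorem phase1_inv (r : List Char) : ∀ (k : Nat), k ≤ r.length →
    (PySem.List.pyRange 0 (k : Int) 1).foldl (aBody1 (r.length : Int)) (r.map (fun c => [c])) =
      (finA r).take k ++ (r.map (fun c => [c])).drop k := by
  intro k
  induction k with
  | zero => simp [PySem.List.pyRange]
  | succ k ih =>
    intro hk
    have hk' : k ≤ r.length := Nat.le_of_succ_le hk
    have hklt : k < r.length := hk
    have hcast : ((k + 1 : Nat) : Int) = (k : Int) + 1 := by push_cast; ring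
    rw [hcast, PySem.List.pyRange_one_succ_right (by positivity), List.foldl_append, ih hk']
    simp only [List.foldl_cons, List.foldl_nil]
    set S := (finA r).take k ++ (r.map (fun c => [c])).drop k with hS
    have hlenfin : (finA r).length = r.length := length_finA r
    have hlen : ((finA r).take k).length = k := by simp [hlenfin, hk']
    have hgetk : PySem.List.pyGet? S (k : Int) = some [r[k]] := by
      rw [PySem.List.pyGet?_natCast, hS, List.getElem?_append_right (by omega), hlen,
        Nat.sub_self, List.getElem?_drop]
      simp [hklt]
    have htake : (finA r).take (k + 1) = (finA r).take k ++ (finA r)[k]?.toList := by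
      rw [List.take_add_one]
    have hfk : (finA r)[k]? = some (finVal r[k] r[k + 1]?) := by
      rw [finA_getElem?]; simp [hklt]
    by_cases hlast : k + 1 = r.length
    · -- i == n - 1: continue
      have hcond : ((k : Int) == (r.length : Int) - 1) = true := by
        simp; omega
      unfold aBody1
      rw [if_pos hcond]
      have hnone : r[k + 1]? = none := by simp [hlast]
      rw [htake, hfk, hnone]
      simp only [finVal, Option.toList_some]
      rw [hS]
      have hdrop : (r.map (fun c => [c])).drop k = [r[k]] :: (r.map (fun c => [c])).drop (k + 1) := by
        rw [List.drop_eq_getElem_cons (by simpa using hklt)]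
        simp
      rw [hdrop, List.append_assoc]
      rfl
    · have hk1 : k + 1 < r.length := by omega
      have hcond : ((k : Int) == (r.length : Int) - 1) = false := by
        simp; omega
      have hgetk1 : PySem.List.pyGet? S ((k : Int) + 1) = some [r[k + 1]] := by
        have hc1 : (k : Int) + 1 = ((k + 1 : Nat) : Int) := by push_cast; ring
        rw [hc1, PySem.List.pyGet?_natCast, hS, List.getElem?_append_right (by omega), hlen]
        have hs1 : k + 1 - k = 1 := by omega
        rw [hs1, List.getElem?_drop]
        simp [hk1]
      have hdrop : (r.map (fun c => [c])).drop k = [r[k]] :: (r.map (fun c => [c])).drop (k + 1) := by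
        rw [List.drop_eq_getElem_cons (by simpa using hklt)]
        simp
      have hset : ∀ v, S.set k v = (finA r).take k ++ v :: (r.map (fun c => [c])).drop (k + 1) := by
        intro v
        rw [hS, hdrop, List.set_append_right _ _ (by omega), hlen, Nat.sub_self, List.set_cons_zero]
      unfold aBody1
      rw [if_neg (by simp [hcond])]
      simp only [hgetk, hgetk1, Option.getD_some, strIsdigit_singleton, Int.toNat_natCast]
      rw [htake, hfk]
      simp only [Option.toList_some]
      have hsome : r[k + 1]? = some r[k + 1] := by simp [hk1]
      by_cases hd : PySem.Chars.isdigit r[k] = PySem.Chars.isdigit r[k + 1]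
      · have hfv : finVal r[k] r[k + 1]? = [r[k]] := by simp [hsome, finVal, hd]
        rw [hfv]
        cases h1 : PySem.Chars.isdigit r[k] <;> cases h2 : PySem.Chars.isdigit r[k + 1] <;>
          simp_all [List.append_assoc]
      · have hfv : finVal r[k] r[k + 1]? = [r[k], ' '] := by
          simp only [hsome, finVal]
          rw [if_pos (by simp [bne, hd])]
        rw [hfv]
        cases h1 : PySem.Chars.isdigit r[k] <;> cases h2 : PySem.Chars.isdigit r[k + 1] <;>
          simp_all [List.append_assoc]

theorem phase1 (r : List Char) :
    (PySem.List.pyRange 0 ((r.map (fun c => [c])).length : Int) 1).foldl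
      (aBody1 ((r.map (fun c => [c])).length : Int)) (r.map (fun c => [c])) = finA r := by
  have h := phase1_inv r r.length (le_refl _)
  have h1 : List.take r.length (finA r) = finA r := by
    rw [← length_finA r, List.take_length]
  have h2 : List.drop r.length (r.map (fun c => [c])) = ([] : List (List Char)) := by simp
  rw [h1, h2, List.append_nil] at h
  simpa using h

theorem phase2_inv (tks : List (List Char)) : ∀ (k : Nat), k ≤ tks.length →
    (PySem.List.pyRange 0 (k : Int) 1).foldl aBody2 tks =
      (tks.map gTok).take k ++ tks.drop k := by
  intro k
  induction k with
  | zero => simp [PySem.List.pyRange]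
  | succ k ih =>
    intro hk
    have hk' : k ≤ tks.length := Nat.le_of_succ_le hk
    have hklt : k < tks.length := hk
    have hcast : ((k + 1 : Nat) : Int) = (k : Int) + 1 := by push_cast; ring
    rw [hcast, PySem.List.pyRange_one_succ_right (by positivity), List.foldl_append, ih hk']
    simp only [List.foldl_cons, List.foldl_nil]
    have hlen : ((tks.map gTok).take k).length = k := by
      simp [Nat.le_of_succ_le hk]
    have hget : PySem.List.pyGet? ((tks.map gTok).take k ++ tks.drop k) (k : Int)
        = some tks[k] := by
      rw [PySem.List.pyGet?_natCast, List.getElem?_append_right (by omega),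
        hlen, Nat.sub_self, List.getElem?_drop]
      simp [hklt]
    have hdrop : tks.drop k = tks[k] :: tks.drop (k + 1) := List.drop_eq_getElem_cons hklt
    have htake : (tks.map gTok).take (k + 1) = (tks.map gTok).take k ++ [gTok tks[k]] := by
      rw [List.take_add_one]
      simp [hklt]
    unfold aBody2
    simp only [hget, Option.getD_some]
    by_cases hc : (PySem.Chars.isIn ['+'] tks[k] || PySem.Chars.isIn ['-'] tks[k]) = true
    · rw [if_pos hc]
      rw [htake, hdrop]
      rw [List.set_append_right _ _ (by omega)]
      simp only [hlen, Int.toNat_natCast, Nat.sub_self, List.set_cons_zero]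
      have hg : gTok tks[k] = (calcSignA tks[k]).getD tks[k] := by
        unfold gTok; rw [if_pos hc]
      rw [hg, List.append_assoc]
      rfl
    · rw [if_neg hc, htake, hdrop]
      have hg : gTok tks[k] = tks[k] := by unfold gTok; rw [if_neg hc]
      rw [hg, List.append_assoc]
      rfl

theorem phase2 (tks : List (List Char)) :
    (PySem.List.pyRange 0 ((tks.length : Int)) 1).foldl aBody2 tks = tks.map gTok := by
  rw [phase2_inv tks tks.length (le_refl _)]
  simp

theorem stepB_space (c : Char) (ts : List (List Char)) (cur : List Char) (kind : Option Bool)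
    (h : PySem.Chars.isspace c = true) :
    stepB (ts, cur, kind) c = (flushB ts kind cur, [], none) := by simp [stepB, h]

theorem stepB_flush (c : Char) (ts : List (List Char)) (cur : List Char) (kind : Option Bool)
    (h : PySem.Chars.isspace c = false)
    (h2 : ((some (PySem.Chars.isdigit c) : Option Bool) != kind) = true) :
    stepB (ts, cur, kind) c = (flushB ts kind cur, [c], some (PySem.Chars.isdigit c)) := by
  simp only [stepB, h, Bool.false_eq_true, if_false, h2, if_true]

theorem stepB_grow (c : Char) (ts : List (List Char)) (cur : List Char) (kind : Option Bool)
    (h : PySem.Chars.isspace c = false)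
    (h2 : ((some (PySem.Chars.isdigit c) : Option Bool) != kind) = false) :
    stepB (ts, cur, kind) c = (ts, cur ++ [c], kind) := by
  simp only [stepB, h, Bool.false_eq_true, if_false, h2]

theorem flushB_append (ts : List (List Char)) (kind : Option Bool) (cur : List Char) :
    flushB ts kind cur = ts ++ flushB [] kind cur := by
  unfold flushB; split_ifs <;> simp

theorem flushB_append_left (a ts : List (List Char)) (kind : Option Bool) (cur : List Char) :
    flushB (a ++ ts) kind cur = a ++ flushB ts kind cur := by
  unfold flushB; split_ifs <;> simp

theorem flushB_eq_g (cur : List Char) (hc : cur ≠ []) (k : Bool)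
    (hk : k = true → cur.all PySem.Chars.isdigit = true) :
    flushB [] (some k) cur = [gTok cur] := by
  cases k with
  | false =>
    unfold flushB gTok
    split_ifs <;> simp_all
  | true =>
    have hall := hk rfl
    have hplus : PySem.Chars.isIn ['+'] cur = false := by
      rw [Bool.eq_false_iff]
      intro h
      have hm := (isIn_singleton _ _).mp h
      have := List.all_eq_true.mp hall _ hm
      simp [PySem.Chars.isdigit] at this
    have hminus : PySem.Chars.isIn ['-'] cur = false := by
      rw [Bool.eq_false_iff]
      intro h
      have hm := (isIn_singleton _ _).mp h
      have := List.all_eq_true.mp hall _ hm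
      simp [PySem.Chars.isdigit] at this
    unfold flushB gTok
    simp [hplus, hminus, hc]

theorem foldl_stepB_shift : ∀ (rs : List Char) (ts : List (List Char)) (cur : List Char)
    (kind : Option Bool),
    rs.foldl stepB (ts, cur, kind) =
      (ts ++ (rs.foldl stepB ([], cur, kind)).1, (rs.foldl stepB ([], cur, kind)).2)
  | [], ts, cur, kind => by simp
  | c :: rs, ts, cur, kind => by
    simp only [List.foldl_cons]
    by_cases h : PySem.Chars.isspace c = true
    · rw [stepB_space c ts cur kind h, stepB_space c [] cur kind h,
        foldl_stepB_shift rs (flushB ts kind cur), foldl_stepB_shift rs (flushB [] kind cur),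
        flushB_append ts kind cur]
      simp [List.append_assoc]
    · have h' : PySem.Chars.isspace c = false := by simpa using h
      by_cases h2 : ((some (PySem.Chars.isdigit c) : Option Bool) != kind) = true
      · rw [stepB_flush c ts cur kind h' h2, stepB_flush c [] cur kind h' h2,
          foldl_stepB_shift rs (flushB ts kind cur), foldl_stepB_shift rs (flushB [] kind cur),
          flushB_append ts kind cur]
        simp [List.append_assoc]
      · have h2' : ((some (PySem.Chars.isdigit c) : Option Bool) != kind) = false := by
          simpa using h2
        rw [stepB_grow c ts cur kind h' h2', stepB_grow c [] cur kind h' h2']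
        exact foldl_stepB_shift rs ts (cur ++ [c]) kind

theorem finB_cons_space (c : Char) (t cur : List Char) (kind : Option Bool)
    (h : PySem.Chars.isspace c = true) :
    finB (c :: t) cur kind = flushB [] kind cur ++ finB t [] none := by
  unfold finB
  simp only [List.foldl_cons, stepB_space c [] cur kind h]
  rw [foldl_stepB_shift]
  dsimp only
  rw [flushB_append_left]

theorem finB_cons_flush (c : Char) (t cur : List Char) (kind : Option Bool)
    (h : PySem.Chars.isspace c = false)
    (h2 : ((some (PySem.Chars.isdigit c) : Option Bool) != kind) = true) :
    finB (c :: t) cur kind =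
      flushB [] kind cur ++ finB t [c] (some (PySem.Chars.isdigit c)) := by
  unfold finB
  simp only [List.foldl_cons, stepB_flush c [] cur kind h h2]
  rw [foldl_stepB_shift]
  dsimp only
  rw [flushB_append_left]

theorem finB_cons_grow (c : Char) (t cur : List Char) (kind : Option Bool)
    (h : PySem.Chars.isspace c = false)
    (h2 : ((some (PySem.Chars.isdigit c) : Option Bool) != kind) = false) :
    finB (c :: t) cur kind = finB t (cur ++ [c]) kind := by
  unfold finB
  simp only [List.foldl_cons, stepB_grow c [] cur kind h h2]

theorem go_nil (curR : List Char) (acc : List (List Char)) :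
    PySem.Chars.split₀.go [] curR acc =
      if curR.isEmpty then acc.reverse else (curR.reverse :: acc).reverse := rfl

theorem go_space (c : Char) (rest curR : List Char) (acc : List (List Char))
    (h : PySem.Chars.isspace c = true) :
    PySem.Chars.split₀.go (c :: rest) curR acc =
      if curR.isEmpty then PySem.Chars.split₀.go rest [] acc
      else PySem.Chars.split₀.go rest [] (curR.reverse :: acc) := by
  rw [PySem.Chars.split₀.go]
  rw [if_pos h]

theorem go_char (c : Char) (rest curR : List Char) (acc : List (List Char))
    (h : PySem.Chars.isspace c = false) :
    PySem.Chars.split₀.go (c :: rest) curR acc =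
      PySem.Chars.split₀.go rest (c :: curR) acc := by
  rw [PySem.Chars.split₀.go]
  rw [if_neg (by simp [h])]

theorem main_gen : ∀ (rs cur : List Char) (kind pk : Option Bool) (acc : List (List Char)),
    INV cur kind pk →
    (PySem.Chars.split₀.go (insTail pk rs) cur.reverse acc).map gTok =
      acc.reverse.map gTok ++ finB rs cur kind := by
  intro rs
  induction rs with
  | nil =>
    intro cur kind pk acc hinv
    simp only [insTail, go_nil]
    rcases hinv with ⟨hc, hk, _⟩ | ⟨hc, hpk, k, hk, hdig⟩
    · subst hc hk
      simp [finB, flushB]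
    · subst hk
      rw [if_neg (by simp [List.isEmpty_iff, hc])]
      simp only [List.reverse_reverse]
      rw [show finB [] cur (some k) = flushB [] (some k) cur from rfl,
        flushB_eq_g cur hc k hdig]
      simp
  | cons c t ih =>
    intro cur kind pk acc hinv
    simp only [insTail]
    by_cases hsp : PySem.Chars.isspace c = true
    · have hdc : PySem.Chars.isdigit c = false := isspace_not_isdigit c hsp
      rw [finB_cons_space c t cur kind hsp]
      rcases hinv with ⟨hc, hk, hpk⟩ | ⟨hc, hpk, k, hk, hdig⟩
      · subst hc hk
        have hsep : (if pk != none && pk != some (PySem.Chars.isdigit c) then [' ']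
            else ([] : List Char)) = [] := by
          rw [hdc]
          match pk, hpk with
          | none, _ => simp
          | some false, _ => simp
          | some true, hpk => exact absurd rfl hpk
        rw [hsep, List.nil_append, List.reverse_nil,
          go_space c _ [] acc hsp, if_pos List.isEmpty_nil, hdc]
        have hih := ih [] none (some false) acc (Or.inl ⟨rfl, rfl, by simp⟩)
        simp only [List.reverse_nil] at hih
        rw [hih]
        simp [flushB]
      · subst hpk hk
        have hflush : flushB [] (some k) cur = [gTok cur] := flushB_eq_g cur hc k hdig
        rw [hdc]
        cases k with
        | true =>
          -- sep = [' ']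
          rw [if_pos (by simp)]
          simp only [List.cons_append, List.nil_append]
          rw [go_space ' ' _ cur.reverse acc (by decide),
            if_neg (by simp [List.isEmpty_iff, hc]), List.reverse_reverse,
            go_space c _ [] (cur :: acc) hsp, if_pos List.isEmpty_nil]
          have hih := ih [] none (some false) (cur :: acc) (Or.inl ⟨rfl, rfl, by simp⟩)
          simp only [List.reverse_nil] at hih
          rw [hih, hflush]
          simp
        | false =>
          rw [if_neg (by simp)]
          rw [List.nil_append, go_space c _ cur.reverse acc hsp,
            if_neg (by simp [List.isEmpty_iff, hc]), List.reverse_reverse]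
          have hih := ih [] none (some false) (cur :: acc) (Or.inl ⟨rfl, rfl, by simp⟩)
          simp only [List.reverse_nil] at hih
          rw [hih, hflush]
          simp
    · have hsp' : PySem.Chars.isspace c = false := by simpa using hsp
      by_cases hmatch : kind = some (PySem.Chars.isdigit c)
      · -- grow
        rcases hinv with ⟨hc, hk, hpk⟩ | ⟨hc, hpk, k, hk, hdig⟩
        · rw [hk] at hmatch; exact absurd hmatch.symm (by simp)
        · have hkdc : k = PySem.Chars.isdigit c := by
            rw [hmatch] at hk; exact (Option.some.inj hk).symm
          rw [hpk, hmatch]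
          rw [if_neg (by simp), List.nil_append,
            go_char c _ cur.reverse acc hsp']
          have hrev : c :: cur.reverse = (cur ++ [c]).reverse := by simp
          rw [hrev]
          have hdig' : PySem.Chars.isdigit c = true →
              (cur ++ [c]).all PySem.Chars.isdigit = true := by
            intro hdct
            simp [List.all_append, hdig (by rw [hkdc, hdct]), hdct]
          rw [ih (cur ++ [c]) (some (PySem.Chars.isdigit c)) (some (PySem.Chars.isdigit c)) acc
            (Or.inr ⟨by simp, rfl, _, rfl, hdig'⟩)]
          rw [finB_cons_grow c t cur (some (PySem.Chars.isdigit c)) hsp' (by simp)]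
      · -- flush
        have h2 : ((some (PySem.Chars.isdigit c) : Option Bool) != kind) = true := by
          simp [bne]
          intro h; exact absurd h.symm hmatch
        rw [finB_cons_flush c t cur kind hsp' h2]
        have hinvc : INV [c] (some (PySem.Chars.isdigit c)) (some (PySem.Chars.isdigit c)) :=
          Or.inr ⟨by simp, rfl, _, rfl, by intro h; simp [h]⟩
        rcases hinv with ⟨hc, hk, hpk⟩ | ⟨hc, hpk, k, hk, hdig⟩
        · subst hc hk
          have hfl : flushB [] none ([] : List Char) = [] := by simp [flushB]
          rw [hfl, List.nil_append, List.reverse_nil]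
          match pk, hpk with
          | none, _ =>
            rw [if_neg (by simp), List.nil_append, go_char c _ [] acc hsp']
            have := ih [c] (some (PySem.Chars.isdigit c)) (some (PySem.Chars.isdigit c)) acc hinvc
            simpa using this
          | some false, _ =>
            by_cases hdcv : PySem.Chars.isdigit c = true
            · rw [hdcv, if_pos (by simp)]
              simp only [List.cons_append, List.nil_append]
              rw [go_space ' ' _ [] acc (by decide), if_pos List.isEmpty_nil,
                go_char c _ [] acc hsp']
              have := ih [c] (some (PySem.Chars.isdigit c)) (some (PySem.Chars.isdigit c)) acc hinvc
              rw [hdcv] at this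
              simpa using this
            · have hdcf : PySem.Chars.isdigit c = false := by simpa using hdcv
              rw [hdcf, if_neg (by simp), List.nil_append, go_char c _ [] acc hsp']
              have := ih [c] (some (PySem.Chars.isdigit c)) (some (PySem.Chars.isdigit c)) acc hinvc
              rw [hdcf] at this
              simpa using this
          | some true, hpk => exact absurd rfl hpk
        · subst hpk hk
          have hkdc : k ≠ PySem.Chars.isdigit c := by
            intro h; exact hmatch (by rw [h])
          have hsep : (if (some k : Option Bool) != none &&
              (some k : Option Bool) != some (PySem.Chars.isdigit c) then [' ']
              else ([] : List Char)) = [' '] := by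
            simp [bne, hkdc]
          rw [hsep]
          simp only [List.cons_append, List.nil_append]
          rw [go_space ' ' _ cur.reverse acc (by decide),
            if_neg (by simp [List.isEmpty_iff, hc]), List.reverse_reverse,
            go_char c _ [] (cur :: acc) hsp']
          have := ih [c] (some (PySem.Chars.isdigit c)) (some (PySem.Chars.isdigit c))
            (cur :: acc) hinvc
          rw [flushB_eq_g cur hc k hdig]
          simp only [List.reverse_cons, List.reverse_nil, List.nil_append,
            List.map_append] at this ⊢
          rw [this]
          simp

theorem main_lemma (r : List Char) :
    (PySem.Chars.split₀ (insTail none r)).map gTok =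
      (let st := r.foldl stepB ([], [], none); flushB st.1 st.2.2 st.2.1) := by
  have h := main_gen r [] none none [] (Or.inl ⟨rfl, rfl, by simp⟩)
  simpa [PySem.Chars.split₀, finB] using h

-- ===== VERDICT (by name: the statement is the Claim_ definition above) =====
theorem calculate_spec : Claim_equal_calculate := by
  intro text _
  unfold Spec_calculate calculate calculate_alt
  simp only [PySem.Chars.join]
  rw [phase1, phase2, join_finA, main_lemma]
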